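-- pv_equiv track=rewrite | github.com/paukerspinner/LabMobile | Lab1/cdr.py | tariffing
-- ===== SOURCE A (Python) =====
-- class Record:
--     def __init__(self, detailArray):
--         self.timestamp = detailArray[0]
--         self.msidnOrigin = detailArray[1]
--         self.msisdnDest = detailArray[2]
--         self.callDuration = detailArray[3]
--         self.smsNumber = detailArray[4]
--
--     def smsTariffing(self):
--         return max(0, self.smsNumber - 10) * 5
--
--     def outgoingCallTariffing(self):
--         return min(self.callDuration, 10) * 2
--
--     def imcomingCallTariffing(self):
--         return self.callDuration * 4
--
--     def toString(self):
--         return '%s <> %s <> %s <> %d <> %d' % (self.timestamp, self.msidnOrigin, self.msisdnDest, self.callDuration, self.smsNumber)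
--
-- def getRecords(telNum, data):
--     originRecords = []
--     destRecords = []
--
--     for line in data:
--         if line[1] == telNum:
--             originRecords.append(Record(line))
--         elif line[2] == telNum:
--             destRecords.append(Record(line))
--
--     return [originRecords, destRecords]
--
-- def tariffing(telNum, data):
--     originRecords, destRecords = getRecords(telNum, data)
--
--     smsBill = 0
--     outgoingBill = 0
--     incomingBill = 0
--     for orgRc in originRecords:
--         smsBill += orgRc.smsTariffing()
--         outgoingBill += orgRc.outgoingCallTariffing()
--     for dstRc in destRecords:
--         incomingBill += dstRc.imcomingCallTariffing()
--
--     return [smsBill, outgoingBill, incomingBill]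
-- ===== SOURCE B (Python) =====
-- def tariffing(telNum, data):
--     smsBill = 0
--     outgoingBill = 0
--     incomingBill = 0
--     for line in data:
--         if line[1] == telNum:
--             smsBill += max(0, line[4] - 10) * 5
--             outgoingBill += min(line[3], 10) * 2
--         elif line[2] == telNum:
--             incomingBill += line[3] * 4
--     return [smsBill, outgoingBill, incomingBill]
-- ===== Notes on version B (the rewrite author's own statement) =====
-- stated objective: simpler
-- what changed: Single pass with three running totals replaces the Record class and the getRecords split into two intermediate lists followed by two summation loops.
import Mathlib
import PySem

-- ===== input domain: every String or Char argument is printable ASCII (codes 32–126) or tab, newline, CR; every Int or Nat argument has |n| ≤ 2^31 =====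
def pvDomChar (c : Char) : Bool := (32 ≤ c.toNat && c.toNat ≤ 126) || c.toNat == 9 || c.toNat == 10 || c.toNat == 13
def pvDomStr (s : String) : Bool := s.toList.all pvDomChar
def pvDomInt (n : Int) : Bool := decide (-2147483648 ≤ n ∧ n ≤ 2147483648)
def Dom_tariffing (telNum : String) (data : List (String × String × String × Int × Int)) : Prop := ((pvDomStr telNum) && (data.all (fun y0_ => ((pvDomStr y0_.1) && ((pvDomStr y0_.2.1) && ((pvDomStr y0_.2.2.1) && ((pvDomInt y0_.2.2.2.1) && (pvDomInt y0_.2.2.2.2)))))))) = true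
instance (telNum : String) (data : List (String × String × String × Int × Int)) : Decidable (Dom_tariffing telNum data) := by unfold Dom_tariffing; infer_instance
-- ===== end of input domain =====

-- ===== PORT A =====
-- B replaces A's Record/getRecords split (two intermediate lists, then two summation loops) by one pass with three running totals (simpler).

-- Record(line): keeps the fields of the tuple (timestamp, origin, dest, callDuration, smsNumber)
structure PvRecord where
  timestamp : String
  msidnOrigin : String
  msisdnDest : String
  callDuration : Int
  smsNumber : Int
deriving Repr, DecidableEq

def pvMkRecord (line : String × String × String × Int × Int) : PvRecord :=
  ⟨line.1, line.2.1, line.2.2.1, line.2.2.2.1, line.2.2.2.2⟩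

def pvSmsTariffing (r : PvRecord) : Int := max 0 (r.smsNumber - 10) * 5
def pvOutgoingCallTariffing (r : PvRecord) : Int := min r.callDuration 10 * 2
def pvIncomingCallTariffing (r : PvRecord) : Int := r.callDuration * 4

-- getRecords: one loop appending Record(line) to originRecords / destRecords
def pvGetRecords (telNum : String) (data : List (String × String × String × Int × Int)) :
    List PvRecord × List PvRecord :=
  data.foldl (fun (acc : List PvRecord × List PvRecord) line =>
    if line.2.1 == telNum then (acc.1 ++ [pvMkRecord line], acc.2)
    else if line.2.2.1 == telNum then (acc.1, acc.2 ++ [pvMkRecord line])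
    else acc) ([], [])

def tariffing (telNum : String) (data : List (String × String × String × Int × Int)) : List Int :=
  let recs := pvGetRecords telNum data
  let sb := recs.1.foldl (fun acc r => acc + pvSmsTariffing r) 0
  let ob := recs.1.foldl (fun acc r => acc + pvOutgoingCallTariffing r) 0
  let ib := recs.2.foldl (fun acc r => acc + pvIncomingCallTariffing r) 0
  [sb, ob, ib]

-- ===== PORT B =====
def tariffing_alt (telNum : String) (data : List (String × String × String × Int × Int)) : List Int :=
  let acc := data.foldl (fun (acc : Int × Int × Int) line =>
    if line.2.1 == telNum then
      (acc.1 + max 0 (line.2.2.2.2 - 10) * 5, acc.2.1 + min line.2.2.2.1 10 * 2, acc.2.2)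
    else if line.2.2.1 == telNum then
      (acc.1, acc.2.1, acc.2.2 + line.2.2.2.1 * 4)
    else acc) (0, 0, 0)
  [acc.1, acc.2.1, acc.2.2]

-- ===== PRECONDITION & SPEC =====
def Spec_tariffing (telNum : String) (data : List (String × String × String × Int × Int)) (out : List Int) : Prop := out = tariffing_alt telNum data
instance (telNum : String) (data : List (String × String × String × Int × Int)) (out : List Int) : Decidable (Spec_tariffing telNum data out) := by unfold Spec_tariffing; infer_instance

-- ===== CLAIM (what is proved, stated in full; the proofs are below) =====
def Claim_equal_tariffing : Prop := ∀ (telNum : String) (data : List (String × String × String × Int × Int)), Dom_tariffing telNum data → Spec_tariffing telNum data (tariffing telNum data)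

-- ===== LEMMAS AND PROOFS =====

-- the key invariant: A's result from accumulated record lists equals B's fold from the corresponding sums
theorem pv_inv (telNum : String) (data : List (String × String × String × Int × Int))
    (o d : List PvRecord) :
    (let recs := data.foldl (fun (acc : List PvRecord × List PvRecord) line =>
        if line.2.1 == telNum then (acc.1 ++ [pvMkRecord line], acc.2)
        else if line.2.2.1 == telNum then (acc.1, acc.2 ++ [pvMkRecord line])
        else acc) (o, d)
     (recs.1.foldl (fun acc r => acc + pvSmsTariffing r) 0,
      recs.1.foldl (fun acc r => acc + pvOutgoingCallTariffing r) 0,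
      recs.2.foldl (fun acc r => acc + pvIncomingCallTariffing r) 0))
    = data.foldl (fun (acc : Int × Int × Int) line =>
        if line.2.1 == telNum then
          (acc.1 + max 0 (line.2.2.2.2 - 10) * 5, acc.2.1 + min line.2.2.2.1 10 * 2, acc.2.2)
        else if line.2.2.1 == telNum then
          (acc.1, acc.2.1, acc.2.2 + line.2.2.2.1 * 4)
        else acc)
        (o.foldl (fun acc r => acc + pvSmsTariffing r) 0,
         o.foldl (fun acc r => acc + pvOutgoingCallTariffing r) 0,
         d.foldl (fun acc r => acc + pvIncomingCallTariffing r) 0) := by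
  induction data generalizing o d with
  | nil => simp
  | cons line rest ih =>
    simp only [List.foldl_cons]
    split_ifs with h1 h2
    · rw [ih]
      simp [List.foldl_append, pvSmsTariffing, pvOutgoingCallTariffing, pvIncomingCallTariffing, pvMkRecord]
    · rw [ih]
      simp [List.foldl_append, pvSmsTariffing, pvOutgoingCallTariffing, pvIncomingCallTariffing, pvMkRecord]
    · exact ih o d

-- ===== VERDICT (by name: the statement is the Claim_ definition above) =====
theorem tariffing_spec : Claim_equal_tariffing := by
  intro telNum data _
  unfold Spec_tariffing tariffing tariffing_alt pvGetRecords
  have := pv_inv telNum data [] []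
  simp only [List.foldl_nil] at this
  simp only []
  rw [show ((0:Int),(0:Int),(0:Int)) = (([]:List PvRecord).foldl (fun acc r => acc + pvSmsTariffing r) 0,
      ([]:List PvRecord).foldl (fun acc r => acc + pvOutgoingCallTariffing r) 0,
      ([]:List PvRecord).foldl (fun acc r => acc + pvIncomingCallTariffing r) 0) from rfl, ← pv_inv]
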